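-- pv_equiv track=rewrite | github.com/Student-Aaditya/NEW_CH | RAG/router/course_router.py | normalize_course_query
-- ===== SOURCE A (Python) =====
-- def normalize_course_query(q: str):
--     q = q.lower()
--
--     REMOVE_WORDS = [
--         "btech", "b.tech", "mtech", "m.tech",
--         "cse", "cs", "engineering", "branch",
--         "specialization", "spec"
--     ]
--
--     for w in REMOVE_WORDS:
--         q = q.replace(w, " ")
--
--     return " ".join(q.split())
-- ===== SOURCE B (Python) =====
-- def normalize_course_query(q: str):
--     REMOVE_WORDS = [
--         "btech", "b.tech", "mtech", "m.tech",
--         "cse", "cs", "engineering", "branch",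
--         "specialization", "spec"
--     ]
--     # Keep a list of fragments instead of rebuilding one string per keyword:
--     # splitting a fragment on a keyword removes that keyword exactly where
--     # str.replace would, since no keyword contains the fragment separator.
--     parts = [q.lower()]
--     for w in REMOVE_WORDS:
--         parts = [piece for part in parts for piece in part.split(w)]
--     return " ".join(tok for part in parts for tok in part.split())
-- ===== Notes on version B (the rewrite author's own statement) =====
-- stated objective: alternative
-- what changed: B never rebuilds the whole string per keyword: it keeps a list of fragments, splits every fragment on each keyword (str.split instead of str.replace), and whitespace-tokenizes and joins the fragments once at the end.
import Mathlib
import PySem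

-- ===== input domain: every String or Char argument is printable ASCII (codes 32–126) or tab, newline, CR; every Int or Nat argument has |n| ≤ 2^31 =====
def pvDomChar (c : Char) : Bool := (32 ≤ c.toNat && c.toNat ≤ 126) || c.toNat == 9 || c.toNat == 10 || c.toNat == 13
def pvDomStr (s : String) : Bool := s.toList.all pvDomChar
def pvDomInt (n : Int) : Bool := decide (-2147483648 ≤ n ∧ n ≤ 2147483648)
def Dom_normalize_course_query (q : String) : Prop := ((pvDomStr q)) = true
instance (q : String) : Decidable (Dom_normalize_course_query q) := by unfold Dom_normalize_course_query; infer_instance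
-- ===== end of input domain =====

-- B keeps a LIST OF FRAGMENTS and splits each fragment on every keyword, joining once at the end,
-- instead of A's per-keyword full-string replace passes (objective: alternative, same asymptotic cost).

-- ===== PORT A =====
def pvWordsA : List String :=
  ["btech", "b.tech", "mtech", "m.tech", "cse", "cs", "engineering", "branch", "specialization", "spec"]

def normalize_course_query (q : String) : String :=
  let q1 := PySem.Str.lower q
  let q2 := pvWordsA.foldl (fun s w => PySem.Str.replace s w " ") q1
  PySem.Str.join " " (PySem.Str.split₀ q2)

-- ===== PORT B =====
def pvWordsB : List (List Char) :=
  ["btech".toList, "b.tech".toList, "mtech".toList, "m.tech".toList, "cse".toList,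
   "cs".toList, "engineering".toList, "branch".toList, "specialization".toList, "spec".toList]

def normalize_course_query_alt (q : String) : String :=
  let parts := pvWordsB.foldl (fun ps w => ps.flatMap (fun p => PySem.Chars.splitOn p w)) [PySem.Chars.lower q.toList]
  String.ofList (PySem.Chars.join [' '] (parts.flatMap PySem.Chars.split₀))

-- ===== PRECONDITION & SPEC =====
def Spec_normalize_course_query (q : String) (out : String) : Prop := out = normalize_course_query_alt q
instance (q : String) (out : String) : Decidable (Spec_normalize_course_query q out) := by unfold Spec_normalize_course_query; infer_instance

-- ===== CLAIM (what is proved, stated in full; the proofs are below) =====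
def Claim_equal_normalize_course_query : Prop := ∀ (q : String), Dom_normalize_course_query q → Spec_normalize_course_query q (normalize_course_query q)

-- ===== LEMMAS AND PROOFS =====
def repF (w new : List Char) : List Char → List Char
  | [] => []
  | c :: t =>
    if w.isPrefixOf (c :: t) then new ++ repF w new (t.drop (w.length - 1))
    else c :: repF w new t
termination_by l => l.length
decreasing_by
  · simp
  · simp

theorem drop_eq_of_prefix (w : List Char) (c : Char) (t : List Char) (hw : w ≠ []) :
    List.drop w.length (c :: t) = List.drop (w.length - 1) t := by
  obtain ⟨a, w', rfl⟩ := List.exists_cons_of_ne_nil hw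
  simp

theorem repGo (w new : List Char) (hw : w ≠ []) :
    ∀ (fuel : Nat) (l acc : List Char), l.length ≤ fuel →
      PySem.Chars.replace.go w new fuel l acc = acc.reverse ++ repF w new l := by
  intro fuel
  induction fuel with
  | zero =>
    intro l acc hl
    have : l = [] := List.eq_nil_of_length_eq_zero (Nat.le_zero.mp hl)
    subst this
    rw [PySem.Chars.replace.go]; simp [repF]
  | succ n ih =>
    intro l acc hl
    cases l with
    | nil =>
      rw [PySem.Chars.replace.go]
      · simp [repF]
      · omega
    | cons c t =>
      rw [PySem.Chars.replace.go]
      by_cases hp : w.isPrefixOf (c :: t) = true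
      · simp only [hp, if_true]
        rw [drop_eq_of_prefix w c t hw,
            ih _ _ (by simp only [List.length_drop, List.length_cons] at *; omega), repF]
        simp [hp]
      · simp only [hp, Bool.false_eq_true, if_false]
        rw [ih t (c :: acc) (by simp at hl ⊢; omega), repF]
        simp [hp]

theorem replace_eq_repF (s w new : List Char) (hw : w ≠ []) :
    PySem.Chars.replace s w new = repF w new s := by
  rw [PySem.Chars.replace]
  rw [if_neg (by simp [hw])]
  simpa using repGo w new hw s.length s [] le_rfl

def splF (w : List Char) : List Char → List (List Char)
  | [] => [[]]
  | c :: t =>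
    if w.isPrefixOf (c :: t) then [] :: splF w (t.drop (w.length - 1))
    else
      match splF w t with
      | [] => [[c]]
      | h :: tl => (c :: h) :: tl
termination_by l => l.length
decreasing_by
  · simp
  · simp

def mapHead (f : List Char → List Char) : List (List Char) → List (List Char)
  | [] => []
  | h :: t => f h :: t

theorem splF_ne_nil (w : List Char) (l : List Char) : splF w l ≠ [] := by
  cases l with
  | nil => simp [splF]
  | cons c t =>
    rw [splF]
    split
    · simp
    · split <;> simp

theorem splGo (w : List Char) (hw : w ≠ []) :
    ∀ (fuel : Nat) (l cur : List Char) (acc : List (List Char)), l.length ≤ fuel →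
      PySem.Chars.splitOn.go w fuel l cur acc = acc.reverse ++ mapHead (cur.reverse ++ ·) (splF w l) := by
  intro fuel
  induction fuel with
  | zero =>
    intro l cur acc hl
    have : l = [] := List.eq_nil_of_length_eq_zero (Nat.le_zero.mp hl)
    subst this
    rw [PySem.Chars.splitOn.go]; simp [splF, mapHead]
  | succ n ih =>
    intro l cur acc hl
    cases l with
    | nil =>
      rw [PySem.Chars.splitOn.go]
      · simp [splF, mapHead]
      · omega
    | cons c t =>
      rw [PySem.Chars.splitOn.go]
      by_cases hp : w.isPrefixOf (c :: t) = true
      · simp only [hp, if_true]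
        rw [drop_eq_of_prefix w c t hw,
            ih _ _ _ (by simp only [List.length_drop, List.length_cons] at *; omega), splF]
        simp only [hp, if_true, mapHead]
        cases splF w (List.drop (w.length - 1) t) <;> simp
      · simp only [hp, Bool.false_eq_true, if_false]
        rw [ih t (c :: cur) acc (by simp at hl ⊢; omega), splF]
        simp only [hp, Bool.false_eq_true, if_false]
        obtain ⟨h, tl, hht⟩ : ∃ h tl, splF w t = h :: tl := by
          rcases e : splF w t with _ | ⟨h, tl⟩
          · exact absurd e (splF_ne_nil w t)
          · exact ⟨h, tl, rfl⟩
        rw [hht]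
        simp [mapHead]

theorem splitOn_eq_splF (s w : List Char) (hw : w ≠ []) :
    PySem.Chars.splitOn s w = splF w s := by
  rw [PySem.Chars.splitOn, splGo w hw (s.length + 1) s [] [] (by omega)]
  rcases e : splF w s with _ | ⟨h, tl⟩
  · exact absurd e (splF_ne_nil w s)
  · simp [mapHead]

theorem repF_eq_join_splF (w new : List Char) :
    ∀ l, repF w new l = PySem.Chars.join new (splF w l) := by
  intro l
  induction hN : l.length using Nat.strong_induction_on generalizing l with
  | _ n ih =>
  subst hN
  cases l with
  | nil => simp [repF, splF, PySem.Chars.join, List.intercalate]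
  | cons c t =>
    rw [repF, splF]
    by_cases hp : w.isPrefixOf (c :: t) = true
    · simp only [hp, if_true]
      rw [ih _ (by simp only [List.length_drop, List.length_cons]; omega) _ rfl]
      rcases e : splF w (t.drop (w.length - 1)) with _ | ⟨h, tl⟩
      · exact absurd e (splF_ne_nil w _)
      · rw [PySem.Chars.join_cons_cons]
        simp
    · simp only [hp, Bool.false_eq_true, if_false]
      rw [ih _ (by simp) _ rfl]
      rcases e : splF w t with _ | ⟨h, tl⟩
      · exact absurd e (splF_ne_nil w _)
      · cases tl with
        | nil => simp [PySem.Chars.join_singleton]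
        | cons h2 tl2 => simp [PySem.Chars.join_cons_cons]

theorem isPrefixOf_append_space (w xs ys : List Char) (hsp : ' ' ∉ w) :
    List.isPrefixOf w (xs ++ ' ' :: ys) = List.isPrefixOf w xs := by
  by_cases hx : w <+: xs
  · have hyes : w <+: xs ++ ' ' :: ys := hx.trans (List.prefix_append xs (' ' :: ys))
    rw [List.isPrefixOf_iff_prefix.mpr hyes, List.isPrefixOf_iff_prefix.mpr hx]
  · have hno : ¬ w <+: xs ++ ' ' :: ys := by
      intro hpre
      rcases Nat.lt_or_ge xs.length w.length with hlt | hle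
      · apply hsp
        have h2 : w = xs ++ List.take (w.length - xs.length) (' ' :: ys) := by
          have := List.prefix_iff_eq_take.mp hpre
          rw [List.take_append, List.take_of_length_le (by omega)] at this
          exact this
        rw [h2]
        refine List.mem_append_right _ ?_
        rw [List.take_cons (by omega)]
        simp
      · exact hx (List.prefix_of_prefix_length_le hpre (List.prefix_append xs (' ' :: ys)) (by simpa))
    have h1 : List.isPrefixOf w (xs ++ ' ' :: ys) = false := by
      rw [← Bool.not_eq_true]; simpa [List.isPrefixOf_iff_prefix] using hno
    have h2 : List.isPrefixOf w xs = false := by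
      rw [← Bool.not_eq_true]; simpa [List.isPrefixOf_iff_prefix] using hx
    rw [h1, h2]

theorem drop_append_space (w xs ys : List Char) (h : List.isPrefixOf w xs = true) :
    List.drop w.length (xs ++ ' ' :: ys) = List.drop w.length xs ++ ' ' :: ys := by
  rw [List.drop_append_of_le_length]
  simp only [List.isPrefixOf_iff_prefix] at h
  exact h.length_le

theorem repF_append_space (w new : List Char) (hw : w ≠ []) (hsp : ' ' ∉ w) :
    ∀ xs ys, repF w new (xs ++ ' ' :: ys) = repF w new xs ++ ' ' :: repF w new ys := by
  intro xs
  induction hN : xs.length using Nat.strong_induction_on generalizing xs with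
  | _ n ih =>
  subst hN
  intro ys
  cases xs with
  | nil =>
    have hnp : List.isPrefixOf w (' ' :: ys) = false := by
      obtain ⟨a, w', rfl⟩ := List.exists_cons_of_ne_nil hw
      have ha : (a == ' ') = false := by
        simp only [beq_eq_false_iff_ne, ne_eq]
        intro h; exact hsp (h ▸ List.mem_cons_self)
      simp [List.isPrefixOf, ha]
    simp only [List.nil_append, repF]
    simp [hnp]
  | cons c t =>
    have hpre := isPrefixOf_append_space w (c :: t) ys hsp
    rw [List.cons_append, repF, repF]
    rcases hp : List.isPrefixOf w (c :: t) with _ | _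
    · rw [hp] at hpre
      simp only [List.cons_append] at hpre
      rw [hpre]
      simp only [Bool.false_eq_true, if_false]
      rw [ih t.length (by simp) t rfl]
      simp
    · rw [hp] at hpre
      simp only [List.cons_append] at hpre
      rw [hpre]
      simp only [if_true]
      have hd : List.drop (w.length - 1) (t ++ ' ' :: ys) = List.drop (w.length - 1) t ++ ' ' :: ys := by
        have h3 := drop_append_space w (c :: t) ys hp
        rw [List.cons_append, drop_eq_of_prefix w c (t ++ ' ' :: ys) hw,
            drop_eq_of_prefix w c t hw] at h3
        exact h3
      rw [hd, ih _ (by simp only [List.length_drop, List.length_cons]; omega) _ rfl]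
      simp

def tokF : List Char → List Char → List (List Char)
  | [], cur => if cur.isEmpty then [] else [cur.reverse]
  | c :: rest, cur =>
    if PySem.Chars.isspace c then
      (if cur.isEmpty then tokF rest [] else cur.reverse :: tokF rest [])
    else tokF rest (c :: cur)

theorem tokGo : ∀ (l cur : List Char) (acc : List (List Char)),
    PySem.Chars.split₀.go l cur acc = acc.reverse ++ tokF l cur := by
  intro l
  induction l with
  | nil =>
    intro cur acc
    rw [PySem.Chars.split₀.go, tokF]
    split <;> simp
  | cons c rest ih =>
    intro cur acc
    rw [PySem.Chars.split₀.go, tokF]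
    by_cases hs : PySem.Chars.isspace c = true
    · simp only [hs, if_true]
      by_cases hc : cur.isEmpty = true <;> simp [hc, ih]
    · simp only [hs, Bool.false_eq_true, if_false]
      rw [ih]

theorem split₀_eq_tokF (s : List Char) : PySem.Chars.split₀ s = tokF s [] := by
  rw [PySem.Chars.split₀, tokGo]
  simp

theorem tokF_append_space : ∀ (xs cur ys : List Char),
    tokF (xs ++ ' ' :: ys) cur = tokF xs cur ++ tokF ys [] := by
  intro xs
  induction xs with
  | nil =>
    intro cur ys
    simp only [List.nil_append]
    rw [tokF, tokF]
    have : PySem.Chars.isspace ' ' = true := by decide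
    simp only [this, if_true]
    by_cases hc : cur.isEmpty = true <;> simp [hc]
  | cons c rest ih =>
    intro cur ys
    rw [List.cons_append, tokF, tokF]
    by_cases hs : PySem.Chars.isspace c = true
    · simp only [hs, if_true]
      by_cases hc : cur.isEmpty = true <;> simp [hc, ih]
    · simp only [hs, Bool.false_eq_true, if_false]
      rw [ih]

theorem split₀_append_space (xs ys : List Char) :
    PySem.Chars.split₀ (xs ++ ' ' :: ys) = PySem.Chars.split₀ xs ++ PySem.Chars.split₀ ys := by
  rw [split₀_eq_tokF, split₀_eq_tokF, split₀_eq_tokF, tokF_append_space]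

theorem join_append_space (as bs : List (List Char)) (ha : as ≠ []) (hb : bs ≠ []) :
    PySem.Chars.join [' '] (as ++ bs) = PySem.Chars.join [' '] as ++ ' ' :: PySem.Chars.join [' '] bs := by
  induction as with
  | nil => exact absurd rfl ha
  | cons a as' ih =>
    cases as' with
    | nil =>
      rcases bs with _ | ⟨b, bs'⟩
      · exact absurd rfl hb
      · rw [List.singleton_append, PySem.Chars.join_cons_cons, PySem.Chars.join_singleton]
        simp
    | cons a2 as'' =>
      simp only [List.cons_append]
      rw [PySem.Chars.join_cons_cons]
      have h2 : PySem.Chars.join [' '] (a2 :: (as'' ++ bs)) =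
          PySem.Chars.join [' '] (a2 :: as'') ++ ' ' :: PySem.Chars.join [' '] bs := by
        have := ih (by simp)
        simpa using this
      rw [h2, PySem.Chars.join_cons_cons]
      simp

theorem split₀_join (parts : List (List Char)) :
    PySem.Chars.split₀ (PySem.Chars.join [' '] parts) = parts.flatMap PySem.Chars.split₀ := by
  induction parts with
  | nil => simp [PySem.Chars.join_nil, split₀_eq_tokF, tokF]
  | cons p rest ih =>
    cases rest with
    | nil => simp [PySem.Chars.join_singleton]
    | cons p2 rest' =>
      rw [PySem.Chars.join_cons_cons]
      have : p ++ [' '] ++ PySem.Chars.join [' '] (p2 :: rest') =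
          p ++ ' ' :: PySem.Chars.join [' '] (p2 :: rest') := by simp
      rw [this, split₀_append_space, ih]
      simp

theorem repF_join (w : List Char) (hw : w ≠ []) (hsp : ' ' ∉ w) (parts : List (List Char)) :
    repF w [' '] (PySem.Chars.join [' '] parts) =
      PySem.Chars.join [' '] (parts.flatMap (fun p => splF w p)) := by
  induction parts with
  | nil => simp [PySem.Chars.join_nil, repF]
  | cons p rest ih =>
    cases rest with
    | nil =>
      simp only [PySem.Chars.join_singleton, List.flatMap_cons, List.flatMap_nil, List.append_nil]
      exact repF_eq_join_splF w [' '] p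
    | cons p2 rest' =>
      rw [PySem.Chars.join_cons_cons]
      have h1 : p ++ [' '] ++ PySem.Chars.join [' '] (p2 :: rest') =
          p ++ ' ' :: PySem.Chars.join [' '] (p2 :: rest') := by simp
      rw [h1, repF_append_space w [' '] hw hsp, ih, repF_eq_join_splF w [' '] p]
      simp only [List.flatMap_cons]
      rw [join_append_space (splF w p) _ (splF_ne_nil w p)
            (by simp only [ne_eq, List.append_eq_nil_iff, not_and]
                intro hc; exact absurd hc (splF_ne_nil w p2))]

theorem fold_replace_join (ws : List (List Char)) (h : ∀ w ∈ ws, w ≠ [] ∧ ' ' ∉ w) :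
    ∀ parts, List.foldl (fun s w => PySem.Chars.replace s w [' ']) (PySem.Chars.join [' '] parts) ws =
      PySem.Chars.join [' '] (List.foldl (fun ps w => ps.flatMap (fun p => PySem.Chars.splitOn p w)) parts ws) := by
  induction ws with
  | nil => intro parts; simp
  | cons w rest ih =>
    intro parts
    obtain ⟨hw, hsp⟩ := h w List.mem_cons_self
    simp only [List.foldl_cons]
    rw [replace_eq_repF _ w [' '] hw, repF_join w hw hsp parts]
    have hs : parts.flatMap (fun p => PySem.Chars.splitOn p w)
        = parts.flatMap (fun p => splF w p) := by
      induction parts with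
      | nil => rfl
      | cons p ps ihp => simp only [List.flatMap_cons, ihp, splitOn_eq_splF p w hw]
    rw [ih (fun w' hw' => h w' (List.mem_cons_of_mem _ hw')) _, hs]

theorem fold_toList (ws : List String) (s : String) :
    (List.foldl (fun s w => PySem.Str.replace s w " ") s ws).toList =
      List.foldl (fun l w => PySem.Chars.replace l w [' ']) s.toList (ws.map String.toList) := by
  induction ws generalizing s with
  | nil => simp
  | cons w rest ih =>
    simp only [List.foldl_cons, List.map_cons]
    rw [ih]
    congr 1
    rw [PySem.Str.toList_replace]
    rfl


theorem main_eq (q : String) : normalize_course_query q = normalize_course_query_alt q := by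
  apply String.toList_inj.mp
  unfold normalize_course_query normalize_course_query_alt
  simp only [PySem.Str.toList_join, String.toList_ofList]
  rw [PySem.Str.split₀_map_toList]
  have hfold := fold_toList pvWordsA (PySem.Str.lower q)
  have hmap : pvWordsA.map String.toList = pvWordsB := rfl
  rw [hmap] at hfold
  rw [hfold, PySem.Str.toList_lower]
  have hseed : PySem.Chars.lower q.toList = PySem.Chars.join [' '] [PySem.Chars.lower q.toList] :=
    (PySem.Chars.join_singleton _ _).symm
  have hwords : ∀ w ∈ pvWordsB, w ≠ [] ∧ ' ' ∉ w := by decide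
  conv_lhs => rw [hseed]
  rw [fold_replace_join pvWordsB hwords [PySem.Chars.lower q.toList], split₀_join]
  rfl

-- ===== VERDICT (by name: the statement is the Claim_ definition above) =====
theorem normalize_course_query_spec : Claim_equal_normalize_course_query := by
  intro q _
  unfold Spec_normalize_course_query
  exact main_eq q
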